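-- pv_equiv track=rewrite | github.com/piotrch-git/kurs_py | dzień04/09_zadania.py | licznik
-- ===== SOURCE A (Python) =====
-- def licznik(napis,znak1='<',znak2='>'):
--     licznik = 0
--     cena = 0
--     for znak in napis:
--         if znak == znak1:
--             cena += 1
--         elif znak == znak2:
--             cena -= 1
--         else:
--             licznik += cena
--     return(licznik)
-- ===== SOURCE B (Python) =====
-- def licznik(napis, znak1='<', znak2='>'):
--     deltas = [1 if z == znak1 else (-1 if z == znak2 else 0) for z in napis]
--     prefs = []
--     s = 0
--     for d in deltas:
--         s += d
--         prefs.append(s)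
--     return sum(p for z, p in zip(napis, prefs) if z != znak1 and z != znak2)
-- ===== Notes on version B (the rewrite author's own statement) =====
-- stated objective: alternative
-- what changed: Replaces the single stateful loop carrying two counters by a three-phase pipeline: map characters to +1/-1/0 deltas, take prefix sums, then sum the prefix values at non-bracket positions.
import Mathlib
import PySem

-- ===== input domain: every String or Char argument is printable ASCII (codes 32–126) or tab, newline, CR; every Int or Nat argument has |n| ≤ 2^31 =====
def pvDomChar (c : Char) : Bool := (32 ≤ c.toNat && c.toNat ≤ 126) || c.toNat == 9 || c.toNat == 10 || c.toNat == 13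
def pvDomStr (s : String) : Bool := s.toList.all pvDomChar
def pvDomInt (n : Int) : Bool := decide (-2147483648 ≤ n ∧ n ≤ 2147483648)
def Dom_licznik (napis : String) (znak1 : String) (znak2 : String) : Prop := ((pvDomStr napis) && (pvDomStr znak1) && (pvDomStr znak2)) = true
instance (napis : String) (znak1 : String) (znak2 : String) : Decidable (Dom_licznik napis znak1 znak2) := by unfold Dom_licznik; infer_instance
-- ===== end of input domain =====

-- B is an alternative decomposition of the same O(n) computation: deltas, prefix sums, sum at non-bracket positions.

-- ===== PORT A =====
-- state = (licznik, cena); one pass over the characters, branches in source order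
def licznik (napis : String) (znak1 : String) (znak2 : String) : Int :=
  (napis.toList.foldl (fun (st : Int × Int) znak =>
      if String.mk [znak] = znak1 then (st.1, st.2 + 1)
      else if String.mk [znak] = znak2 then (st.1, st.2 - 1)
      else (st.1 + st.2, st.2)) (0, 0)).1

-- ===== PORT B =====
-- delta of one character: the if/elif of Source B's comprehension
def pvDelta (znak1 znak2 : String) (z : Char) : Int :=
  if String.mk [z] = znak1 then 1 else if String.mk [z] = znak2 then -1 else 0

-- the prefix-sum loop of Source B (running sum s, appended values become the list)
def pvPrefAux : List Int → Int → List Int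
  | [], _ => []
  | d :: ds, s => (s + d) :: pvPrefAux ds (s + d)

def licznik_alt (napis : String) (znak1 : String) (znak2 : String) : Int :=
  let cs := napis.toList
  let deltas := cs.map (pvDelta znak1 znak2)
  let prefs := pvPrefAux deltas 0
  ((cs.zip prefs).filter
      (fun p => !(String.mk [p.1] = znak1 : Bool) && !(String.mk [p.1] = znak2 : Bool))).foldl
    (fun s p => s + p.2) 0

-- ===== PRECONDITION & SPEC =====
def Spec_licznik (napis : String) (znak1 : String) (znak2 : String) (out : Int) : Prop := out = licznik_alt napis znak1 znak2
instance (napis : String) (znak1 : String) (znak2 : String) (out : Int) : Decidable (Spec_licznik napis znak1 znak2 out) := by unfold Spec_licznik; infer_instance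

-- ===== CLAIM (what is proved, stated in full; the proofs are below) =====
def Claim_equal_licznik : Prop := ∀ (napis : String) (znak1 : String) (znak2 : String), Dom_licznik napis znak1 znak2 → Spec_licznik napis znak1 znak2 (licznik napis znak1 znak2)

-- ===== LEMMAS AND PROOFS =====

-- B's pipeline starting the running sum at an arbitrary value c
def pvG (znak1 znak2 : String) (cs : List Char) (c : Int) : Int :=
  ((cs.zip (pvPrefAux (cs.map (pvDelta znak1 znak2)) c)).filter
      (fun p => !(String.mk [p.1] = znak1 : Bool) && !(String.mk [p.1] = znak2 : Bool))).foldl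
    (fun s p => s + p.2) 0

theorem pv_foldl_shift (l : List (Char × Int)) (a : Int) :
    l.foldl (fun s p => s + p.2) a = a + l.foldl (fun s p => s + p.2) 0 := by
  induction l generalizing a with
  | nil => simp
  | cons x xs ih =>
    simp only [List.foldl]
    rw [ih (a + x.2), ih (0 + x.2)]
    ring

theorem pvG_cons (znak1 znak2 : String) (x : Char) (cs : List Char) (c : Int) :
    pvG znak1 znak2 (x :: cs) c =
      (if String.mk [x] = znak1 ∨ String.mk [x] = znak2 then 0
       else c + pvDelta znak1 znak2 x) + pvG znak1 znak2 cs (c + pvDelta znak1 znak2 x) := by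
  unfold pvG
  simp only [List.map, pvPrefAux, List.zip_cons_cons, List.filter_cons]
  by_cases h1 : String.mk [x] = znak1 <;> by_cases h2 : String.mk [x] = znak2 <;>
    simp only [h1, h2, decide_true, decide_false, Bool.not_true, Bool.not_false,
      Bool.false_and, Bool.and_false, Bool.true_and, if_true, if_false, or_true, true_or,
      or_self, or_false, false_or, List.foldl_cons] <;>
    rw [pv_foldl_shift] <;> simp [pvDelta, h1, h2]

theorem pv_main (znak1 znak2 : String) (cs : List Char) (l c : Int) :
    (cs.foldl (fun (st : Int × Int) znak =>
      if String.mk [znak] = znak1 then (st.1, st.2 + 1)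
      else if String.mk [znak] = znak2 then (st.1, st.2 - 1)
      else (st.1 + st.2, st.2)) (l, c)).1 = l + pvG znak1 znak2 cs c := by
  induction cs generalizing l c with
  | nil => simp [pvG, pvPrefAux]
  | cons x xs ih =>
    simp only [List.foldl_cons]
    rw [pvG_cons]
    by_cases h1 : String.mk [x] = znak1
    · rw [if_pos h1, ih]
      simp [pvDelta, h1]
    · rw [if_neg h1]
      by_cases h2 : String.mk [x] = znak2
      · rw [if_pos h2, ih]
        have hd : pvDelta znak1 znak2 x = -1 := by
          unfold pvDelta; rw [if_neg h1, if_pos h2]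
        rw [hd, if_pos (Or.inr h2)]
        simp [sub_eq_add_neg]
      · rw [if_neg h2, ih]
        simp only [pvDelta, h1, h2, if_false, or_self, add_zero]
        ring

-- ===== VERDICT (by name: the statement is the Claim_ definition above) =====
theorem licznik_spec : Claim_equal_licznik := by
  intro napis znak1 znak2 _
  unfold Spec_licznik licznik licznik_alt
  rw [pv_main]
  simp [pvG]
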